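-- pv_equiv track=rewrite | github.com/ULT1M4T3CK/Nijenhuis | simple_chatbot_demo.py | _extract_faqs
-- ===== SOURCE A (Python) =====
-- from typing import Dict, List, Any
--
-- def _extract_faqs(content: str) -> List[Dict[str, str]]:
--     """Extract FAQ sections from content"""
--     faqs = []
--
--     # Look for FAQ patterns
--     lines = content.split('\n')
--     for i, line in enumerate(lines):
--         if any(keyword in line.lower() for keyword in ['faq', 'question', 'help', 'support']):
--             # Simple FAQ extraction
--             if i + 1 < len(lines):
--                 faqs.append({
--                     'question': line.strip(),
--                     'answer': lines[i + 1].strip()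
--                 })
--
--     return faqs
-- ===== SOURCE B (Python) =====
-- def _extract_faqs(content):
--     """Extract FAQ sections from content"""
--     lines = content.split('\n')
--     lowered = [line.lower() for line in lines]
--     # keyword-major pass: for each keyword, collect the line indices containing it
--     matched = set()
--     for keyword in ('faq', 'question', 'help', 'support'):
--         for i in range(len(lowered)):
--             if keyword in lowered[i]:
--                 matched.add(i)
--     # second stage: emit the pairs in line order
--     faqs = []
--     for i in sorted(matched):
--         if i + 1 < len(lines):
--             faqs.append({'question': lines[i].strip(), 'answer': lines[i + 1].strip()})
--     return faqs
-- ===== Notes on version B (the rewrite author's own statement) =====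
-- stated objective: alternative
-- what changed: Transposes the traversal: instead of A's single line-major pass testing all keywords per line and appending immediately, B runs one pass per keyword collecting matching line indices into a set, sorts the deduplicated indices, and emits the question/answer pairs in a separate final stage.
import Mathlib
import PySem

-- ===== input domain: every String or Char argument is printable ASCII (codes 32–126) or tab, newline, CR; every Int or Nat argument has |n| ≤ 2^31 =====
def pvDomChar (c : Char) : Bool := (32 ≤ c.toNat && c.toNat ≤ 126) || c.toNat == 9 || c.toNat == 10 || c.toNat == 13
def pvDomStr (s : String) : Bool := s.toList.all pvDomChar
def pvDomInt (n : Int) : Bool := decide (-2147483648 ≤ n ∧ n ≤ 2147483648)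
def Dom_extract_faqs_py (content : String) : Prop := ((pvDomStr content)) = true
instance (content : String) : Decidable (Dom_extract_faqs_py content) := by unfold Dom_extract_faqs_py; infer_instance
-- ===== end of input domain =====

-- B transposes the traversal: one pass per keyword collecting matching line indices into a set, then sort and emit pairs in a final stage (alternative; same cost).

-- ===== PORT A =====
-- A-side helper: 'any(keyword in line.lower() for keyword in ['faq', 'question', 'help', 'support'])'
def faqKeywordHit (line : String) : Bool :=
  ["faq", "question", "help", "support"].any (fun k => PySem.Str.isIn k (PySem.Str.lower line))

-- content.split('\n'): sep "\n" ≠ "" so split? is always some; getD [] only totalizes.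
def extract_faqs_py (content : String) : List (List (String × String)) :=
  let lines := (PySem.Str.split? content "\n").getD []
  (PySem.List.enumerate lines 0).foldl (fun faqs p =>
    if faqKeywordHit p.2 then
      if p.1 + 1 < (lines.length : Int) then
        faqs ++ [[("question", PySem.Str.strip p.2),
                  ("answer", PySem.Str.strip (PySem.List.pyGetD lines (p.1 + 1) ""))]]
      else faqs
    else faqs) []

-- ===== PORT B =====
def extract_faqs_py_alt (content : String) : List (List (String × String)) :=
  let lines := (PySem.Str.split? content "\n").getD []
  let lowered := lines.map PySem.Str.lower
  -- keyword-major pass: for each keyword, the set of line indices containing it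
  let matched : PySem.Set Int :=
    ["faq", "question", "help", "support"].foldl (fun s kw =>
      (PySem.List.pyRange 0 (lowered.length : Int)).foldl (fun s i =>
        if PySem.Str.isIn kw (PySem.List.pyGetD lowered i "") then PySem.Set.add s i else s) s)
      PySem.Set.empty
  -- second stage: emit the pairs in line order (sorted(matched))
  (PySem.List.sorted matched (fun i => i)).foldl (fun faqs i =>
    if i + 1 < (lines.length : Int) then
      faqs ++ [[("question", PySem.Str.strip (PySem.List.pyGetD lines i "")),
                ("answer", PySem.Str.strip (PySem.List.pyGetD lines (i + 1) ""))]]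
    else faqs) []

-- ===== PRECONDITION & SPEC =====
def Spec_extract_faqs_py (content : String) (out : List (List (String × String))) : Prop := out = extract_faqs_py_alt content
instance (content : String) (out : List (List (String × String))) : Decidable (Spec_extract_faqs_py content out) := by unfold Spec_extract_faqs_py; infer_instance

-- ===== CLAIM (what is proved, stated in full; the proofs are below) =====
def Claim_equal_extract_faqs_py : Prop := ∀ (content : String), Dom_extract_faqs_py content → Spec_extract_faqs_py content (extract_faqs_py content)

-- ===== LEMMAS AND PROOFS =====

-- the FAQ entry built from lines[i] and lines[i+1]
def faqEntry (lines : List String) (i : Int) : List (String × String) :=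
  [("question", PySem.Str.strip (PySem.List.pyGetD lines i "")),
   ("answer", PySem.Str.strip (PySem.List.pyGetD lines (i + 1) ""))]

-- A's indexed fold over a suffix of `full` in normal form: filtered index list, mapped to entries.
lemma faq_foldA (full : List String) :
    ∀ (l : List String) (s : Nat), full.drop s = l → ∀ (acc : List (List (String × String))),
    (PySem.List.enumerate l (s : Int)).foldl (fun faqs p =>
      if faqKeywordHit p.2 then
        if p.1 + 1 < (full.length : Int) then
          faqs ++ [[("question", PySem.Str.strip p.2),
                    ("answer", PySem.Str.strip (PySem.List.pyGetD full (p.1 + 1) ""))]]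
        else faqs
      else faqs) acc
    = acc ++ ((List.map (fun k : Nat => (k : Int)) (List.range' s l.length)).filter
        (fun i => faqKeywordHit (PySem.List.pyGetD full i "") && decide (i + 1 < (full.length : Int)))).map
        (faqEntry full) := by
  intro l
  induction l with
  | nil => intro s _ acc; simp [PySem.List.enumerate]
  | cons x rest ih =>
    intro s hdrop acc
    have hget : PySem.List.pyGetD full (s : Int) "" = x := by
      have h2 : full[s]? = some x := by
        have := congrArg (fun t => t[0]?) hdrop
        simpa [List.getElem?_drop] using this
      rw [PySem.List.pyGetD_natCast]; simp [List.getD, h2]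
    have hdrop' : full.drop (s + 1) = rest := by
      have h1 : full.drop (s + 1) = (full.drop s).drop 1 := by
        rw [List.drop_drop, Nat.add_comm]
      rw [h1, hdrop, List.drop_one, List.tail_cons]
    have hrec := ih (s + 1) hdrop'
    have hcast : ((s : Int) + 1) = ((s + 1 : Nat) : Int) := by push_cast; ring
    rw [PySem.List.enumerate_cons, List.foldl_cons, List.length_cons, List.range'_succ,
        List.map_cons, List.filter_cons, hcast, hrec]
    by_cases hg : (s : Int) + 1 < (full.length : Int)
    · cases h : faqKeywordHit x <;>
        simp [h, hg, hget, faqEntry, List.append_assoc]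
    · cases h : faqKeywordHit x <;>
        simp [h, hg, hget]

-- membership in the inner index fold that conditionally adds to the set
lemma mem_faq_inner (P : Int → Bool) :
    ∀ (idx : List Int) (s : PySem.Set Int) (x : Int),
    (x ∈ idx.foldl (fun s i => if P i then PySem.Set.add s i else s) s) ↔
      x ∈ s ∨ (x ∈ idx ∧ P x = true) := by
  intro idx
  induction idx with
  | nil => intro s x; simp
  | cons i rest ih =>
    intro s x
    rw [List.foldl_cons]
    by_cases h : P i = true
    · rw [if_pos h, ih, PySem.Set.mem_add]
      constructor
      · rintro ((hs | rfl) | hr)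
        · exact Or.inl hs
        · exact Or.inr ⟨List.mem_cons_self, h⟩
        · exact Or.inr ⟨List.mem_cons_of_mem _ hr.1, hr.2⟩
      · rintro (hs | ⟨hm, hp⟩)
        · exact Or.inl (Or.inl hs)
        · rcases List.mem_cons.mp hm with rfl | hm'
          · exact Or.inl (Or.inr rfl)
          · exact Or.inr ⟨hm', hp⟩
    · rw [if_neg h, ih]
      constructor
      · rintro (hs | ⟨hm, hp⟩)
        · exact Or.inl hs
        · exact Or.inr ⟨List.mem_cons_of_mem _ hm, hp⟩
      · rintro (hs | ⟨hm, hp⟩)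
        · exact Or.inl hs
        · rcases List.mem_cons.mp hm with rfl | hm'
          · exact absurd hp h
          · exact Or.inr ⟨hm', hp⟩

-- membership in the keyword-major double fold
lemma mem_faq_matched (idx : List Int) (P : String → Int → Bool) :
    ∀ (kws : List String) (s : PySem.Set Int) (x : Int),
    (x ∈ kws.foldl (fun s kw => idx.foldl (fun s i => if P kw i then PySem.Set.add s i else s) s) s) ↔
      x ∈ s ∨ (x ∈ idx ∧ ∃ kw ∈ kws, P kw x = true) := by
  intro kws
  induction kws with
  | nil => intro s x; simp
  | cons kw rest ih =>
    intro s x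
    rw [List.foldl_cons, ih, mem_faq_inner]
    constructor
    · rintro ((hs | ⟨hm, hp⟩) | ⟨hm, k, hk, hp⟩)
      · exact Or.inl hs
      · exact Or.inr ⟨hm, kw, List.mem_cons_self, hp⟩
      · exact Or.inr ⟨hm, k, List.mem_cons_of_mem _ hk, hp⟩
    · rintro (hs | ⟨hm, k, hk, hp⟩)
      · exact Or.inl (Or.inl hs)
      · rcases List.mem_cons.mp hk with rfl | hk'
        · exact Or.inl (Or.inr ⟨hm, hp⟩)
        · exact Or.inr ⟨hm, k, hk', hp⟩

-- the double fold keeps the set duplicate-free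
lemma nodup_faq_inner (P : Int → Bool) :
    ∀ (idx : List Int) (s : PySem.Set Int), s.Nodup →
    (idx.foldl (fun s i => if P i then PySem.Set.add s i else s) s).Nodup := by
  intro idx
  induction idx with
  | nil => intro s hs; exact hs
  | cons i rest ih =>
    intro s hs
    rw [List.foldl_cons]
    by_cases h : P i = true
    · rw [if_pos h]; exact ih _ (PySem.Set.nodup_add s i hs)
    · rw [if_neg h]; exact ih _ hs

lemma nodup_faq_matched (idx : List Int) (P : String → Int → Bool) :
    ∀ (kws : List String) (s : PySem.Set Int), s.Nodup →
    (kws.foldl (fun s kw => idx.foldl (fun s i => if P kw i then PySem.Set.add s i else s) s) s).Nodup := by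
  intro kws
  induction kws with
  | nil => intro s hs; exact hs
  | cons kw rest ih => intro s hs; exact ih _ (nodup_faq_inner (P kw) idx s hs)

-- ===== VERDICT (by name: the statement is the Claim_ definition above) =====
theorem extract_faqs_py_spec : Claim_equal_extract_faqs_py := by
  intro content _
  unfold Spec_extract_faqs_py extract_faqs_py extract_faqs_py_alt
  set lines := (PySem.Str.split? content "\n").getD [] with hlines
  set n := lines.length with hn
  -- the common sorted index list: indices of keyword-hit lines, in increasing order
  set L : List Int := (List.map (fun k : Nat => (k : Int)) (List.range n)).filter
      (fun i => faqKeywordHit (PySem.List.pyGetD lines i "")) with hL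
  -- B's set of matched indices
  set matched : PySem.Set Int :=
    ["faq", "question", "help", "support"].foldl (fun s kw =>
      (PySem.List.pyRange 0 (((lines.map PySem.Str.lower).length : Nat) : Int)).foldl (fun s i =>
        if PySem.Str.isIn kw (PySem.List.pyGetD (lines.map PySem.Str.lower) i "") then PySem.Set.add s i else s) s)
      PySem.Set.empty with hmatched
  -- sorted(matched) = L
  have hLpair : L.Pairwise (fun a b => a < b) := by
    apply List.Pairwise.filter
    exact (List.pairwise_map).mpr (List.pairwise_lt_range.imp (by intro a b h; exact_mod_cast h))
  have hLnodup : L.Nodup := hLpair.imp (by intro a b h; exact ne_of_lt h)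
  have hmem : ∀ x : Int, x ∈ matched ↔ x ∈ L := by
    intro x
    rw [hmatched, mem_faq_matched, hL]
    simp only [PySem.Set.empty, List.mem_filter, List.length_map, PySem.List.pyRange_zero_natCast]
    constructor
    · rintro (h | ⟨hm, k, hk, hp⟩)
      · simp at h
      · refine ⟨hm, ?_⟩
        have hx : PySem.List.pyGetD (lines.map PySem.Str.lower) x "" =
            PySem.Str.lower (PySem.List.pyGetD lines x "") :=
          PySem.List.pyGetD_map PySem.Str.lower lines x ""
        rw [hx] at hp
        simp only [faqKeywordHit, List.any_eq_true]
        exact ⟨k, hk, hp⟩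
    · rintro ⟨hm, hp⟩
      refine Or.inr ⟨hm, ?_⟩
      simp only [faqKeywordHit, List.any_eq_true] at hp
      obtain ⟨k, hk, hkp⟩ := hp
      refine ⟨k, hk, ?_⟩
      have hx : PySem.List.pyGetD (lines.map PySem.Str.lower) x "" =
          PySem.Str.lower (PySem.List.pyGetD lines x "") :=
        PySem.List.pyGetD_map PySem.Str.lower lines x ""
      rw [hx]; exact hkp
  have hmnodup : matched.Nodup := by
    rw [hmatched]
    exact nodup_faq_matched _ _ _ PySem.Set.empty (by simp [PySem.Set.empty])
  have hperm : L.Perm matched :=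
    (List.perm_ext_iff_of_nodup hLnodup hmnodup).mpr (fun a => (hmem a).symm)
  have hsorted : PySem.List.sorted matched (fun i => i) = L :=
    PySem.List.sorted_eq_of_perm_of_pairwise_lt matched L (fun i => i) hperm hLpair
  -- evaluate both folds against the common normal form
  have h0 := faq_foldA lines lines 0 (by simp) []
  simp only [Nat.cast_zero] at h0
  dsimp only
  rw [h0, hsorted,
      PySem.List.foldl_append_ite (p := fun i : Int => i + 1 < (lines.length : Int))
        (f := fun i : Int => [("question", PySem.Str.strip (PySem.List.pyGetD lines i "")),
                              ("answer", PySem.Str.strip (PySem.List.pyGetD lines (i + 1) ""))]) L []]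
  rw [hL, List.range_eq_range', List.filter_filter]
  simp only [List.nil_append]
  rw [show (fun i : Int => [("question", PySem.Str.strip (PySem.List.pyGetD lines i "")),
        ("answer", PySem.Str.strip (PySem.List.pyGetD lines (i + 1) ""))]) = faqEntry lines from rfl]
  congr 1
  apply List.filter_congr
  intro i _
  simp [Bool.and_comm]
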